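-- pv_equiv track=rewrite | github.com/sergiDM-0/Ejercicios-python | PYTHON/Estructuras de datos/Hash/hash_MurmurHash3_32_hash_table.py | hash_MurmurHash3_32
-- ===== SOURCE A (Python) =====
-- def  hash_MurmurHash3_32(cadena, seed=0):
--     """
--     Calcula el hash MurmurHash3 de 32 bits de una CADENA (str)
--     y lo devuelve como entero.
--     """
--     # Convertir la cadena a bytes (UTF-8)
--     try:
--         data = cadena.encode('utf-8')
--     except Exception:
--         # Fallback por si acaso (aunque str.encode no suele fallar)
--         data = bytes(cadena, 'utf-8')
--
--     c1 = 0xcc9e2d51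
--     c2 = 0x1b873593
--     r1 = 15
--     r2 = 13
--     m = 5
--     n = 0xe6546b64
--
--     # Longitud y número de bloques
--     length = len(data)
--     nblocks = length // 4
--     h = seed # Iniciar hash con la semilla
--
--     # --- Procesar bloques de 4 bytes ---
--     for i in range(0, nblocks):
--         idx = i * 4
--         # Leer 4 bytes (little-endian)
--         k = (data[idx] & 0xFF) | \
--             ((data[idx + 1] & 0xFF) << 8) | \
--             ((data[idx + 2] & 0xFF) << 16) | \
--             ((data[idx + 3] & 0xFF) << 24)
--
--         # --- Mezcla del bloque ---
--         # (Se usa & 0xFFFFFFFF para simular aritmética de 32 bits sin signo)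
--         k = (k * c1) & 0xFFFFFFFF
--         k = ((k << r1) | (k >> (32 - r1))) & 0xFFFFFFFF # ROL32
--         k = (k * c2) & 0xFFFFFFFF
--
--         h = h ^ k
--         h = ((h << r2) | (h >> (32 - r2))) & 0xFFFFFFFF # ROL32
--         h = (h * m + n) & 0xFFFFFFFF
--
--     # --- Procesar la cola (bytes restantes) ---
--     tail_index = nblocks * 4
--     k = 0
--     tail_size = length & 3 # length % 4
--
--     if tail_size == 3:
--         k ^= (data[tail_index + 2] & 0xFF) << 16
--     if tail_size >= 2: # Cae aquí si es 2 o 3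
--         k ^= (data[tail_index + 1] & 0xFF) << 8
--     if tail_size >= 1: # Cae aquí si es 1, 2 o 3
--         k ^= (data[tail_index] & 0xFF)
--
--         # --- Mezcla de la cola ---
--         k = (k * c1) & 0xFFFFFFFF
--         k = ((k << r1) | (k >> (32 - r1))) & 0xFFFFFFFF # ROL32
--         k = (k * c2) & 0xFFFFFFFF
--         h = h ^ k
--
--     # --- Etapa final (Avalancha/Fmix) ---
--     h ^= length
--     h = (h ^ (h >> 16)) & 0xFFFFFFFF
--     h = (h * 0x85ebca6b) & 0xFFFFFFFF
--     h = (h ^ (h >> 13)) & 0xFFFFFFFF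
--     h = (h * 0xc2b2ae35) & 0xFFFFFFFF
--     h = (h ^ (h >> 16)) & 0xFFFFFFFF
--
--     return h
-- ===== SOURCE B (Python) =====
-- C1 = 0xcc9e2d51
-- C2 = 0x1b873593
-- M32 = 0xFFFFFFFF
--
--
-- def _mix_k(k):
--     """Mix one 32-bit word: k*c1, ROL15, k*c2."""
--     k = (k * C1) & M32
--     k = ((k << 15) | (k >> 17)) & M32
--     k = (k * C2) & M32
--     return k
--
--
-- def _mix_h(h, k):
--     """Fold a mixed word into the hash: h^=k, ROL13, h*5+n."""
--     h ^= k
--     h = ((h << 13) | (h >> 19)) & M32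
--     return (h * 5 + 0xe6546b64) & M32
--
--
-- def _fmix(h, length):
--     """Final avalanche."""
--     h ^= length
--     h = (h ^ (h >> 16)) & M32
--     h = (h * 0x85ebca6b) & M32
--     h = (h ^ (h >> 13)) & M32
--     h = (h * 0xc2b2ae35) & M32
--     return (h ^ (h >> 16)) & M32
--
--
-- def hash_MurmurHash3_32(cadena, seed=0):
--     """Single streaming pass: buffer up to 4 bytes; mix each full word."""
--     data = cadena.encode('utf-8')
--     h = seed
--     buf = []
--     for byte in data:
--         buf.append(byte)
--         if len(buf) == 4:
--             h = _mix_h(h, _mix_k(buf[0]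
--                                  | (buf[1] << 8)
--                                  | (buf[2] << 16)
--                                  | (buf[3] << 24)))
--             buf = []
--     # tail: 0-3 leftover bytes
--     if buf:
--         k = buf[0]
--         if len(buf) >= 2:
--             k |= buf[1] << 8
--         if len(buf) == 3:
--             k |= buf[2] << 16
--         h ^= _mix_k(k)
--     return _fmix(h, len(data))
-- ===== Notes on version B (the rewrite author's own statement) =====
-- stated objective: alternative
-- what changed: B replaces A's indexed block loop (range over nblocks with data[i*4+j] reads) plus separately indexed tail with a single streaming pass over the bytes that collects up to 4 bytes in a buffer, mixing each full word as it completes and mixing the leftover buffer as the tail, with the word-mix, hash-mix and final avalanche factored into named helpers.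
import Mathlib
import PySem

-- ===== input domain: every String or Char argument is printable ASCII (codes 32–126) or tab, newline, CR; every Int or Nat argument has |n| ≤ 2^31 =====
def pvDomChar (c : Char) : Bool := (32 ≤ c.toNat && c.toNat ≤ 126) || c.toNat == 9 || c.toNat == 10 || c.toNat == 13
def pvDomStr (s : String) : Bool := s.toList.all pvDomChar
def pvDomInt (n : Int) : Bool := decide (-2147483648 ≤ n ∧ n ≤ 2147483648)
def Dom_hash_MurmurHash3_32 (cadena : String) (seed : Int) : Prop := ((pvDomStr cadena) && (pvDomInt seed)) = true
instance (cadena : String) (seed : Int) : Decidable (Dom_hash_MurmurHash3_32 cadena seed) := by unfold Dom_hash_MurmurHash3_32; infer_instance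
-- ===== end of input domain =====

-- B re-implements the hash as a single streaming pass over the bytes with a 4-byte buffer
-- and named mixing helpers, instead of A's indexed block loop plus separate tail indexing
-- (objective: alternative decomposition; return value only, no side effects).


-- ===== PORT A =====
-- cadena.encode('utf-8'): exact on the ASCII domain (every char < 128, one byte = its code)
-- the body of A's `for i in range(0, nblocks)` loop (c1 = 0xcc9e2d51, c2 = 0x1b873593,
-- r1 = 15, r2 = 13, m = 5, n = 0xe6546b64 inlined)
def hash_MurmurHash3_32_loop (data : List Int) (h : Int) (i : Int) : Int :=
  let idx := i * 4
  let k := PySem.Int.bor (PySem.Int.bor (PySem.Int.bor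
             (PySem.Int.band (PySem.List.pyGetD data idx 0) 0xFF)
             ((PySem.Int.band (PySem.List.pyGetD data (idx + 1) 0) 0xFF) <<< (8 : Nat)))
             ((PySem.Int.band (PySem.List.pyGetD data (idx + 2) 0) 0xFF) <<< (16 : Nat)))
             ((PySem.Int.band (PySem.List.pyGetD data (idx + 3) 0) 0xFF) <<< (24 : Nat))
  let k := PySem.Int.band (k * 0xcc9e2d51) 0xFFFFFFFF
  let k := PySem.Int.band (PySem.Int.bor (k <<< (15 : Nat)) (k >>> (17 : Nat))) 0xFFFFFFFF
  let k := PySem.Int.band (k * 0x1b873593) 0xFFFFFFFF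
  let h := PySem.Int.bxor h k
  let h := PySem.Int.band (PySem.Int.bor (h <<< (13 : Nat)) (h >>> (19 : Nat))) 0xFFFFFFFF
  PySem.Int.band (h * 5 + 0xe6546b64) 0xFFFFFFFF

def hash_MurmurHash3_32 (cadena : String) (seed : Int) : Int :=
  let data : List Int := cadena.toList.map (fun c => (c.toNat : Int))
  let length : Int := (data.length : Int)
  let nblocks : Int := PySem.Int.floordiv length 4
  let h : Int := seed
  let h := (PySem.List.pyRange 0 nblocks 1).foldl (hash_MurmurHash3_32_loop data) h
  let tail_index := nblocks * 4
  let k : Int := 0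
  let tail_size := PySem.Int.band length 3
  let k := if tail_size = 3 then PySem.Int.bxor k ((PySem.Int.band (PySem.List.pyGetD data (tail_index + 2) 0) 0xFF) <<< (16 : Nat)) else k
  let k := if tail_size ≥ 2 then PySem.Int.bxor k ((PySem.Int.band (PySem.List.pyGetD data (tail_index + 1) 0) 0xFF) <<< (8 : Nat)) else k
  let h := if tail_size ≥ 1 then
      let k := PySem.Int.bxor k (PySem.Int.band (PySem.List.pyGetD data tail_index 0) 0xFF)
      let k := PySem.Int.band (k * 0xcc9e2d51) 0xFFFFFFFF
      let k := PySem.Int.band (PySem.Int.bor (k <<< (15 : Nat)) (k >>> (17 : Nat))) 0xFFFFFFFF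
      let k := PySem.Int.band (k * 0x1b873593) 0xFFFFFFFF
      PySem.Int.bxor h k
    else h
  let h := PySem.Int.bxor h length
  let h := PySem.Int.band (PySem.Int.bxor h (h >>> (16 : Nat))) 0xFFFFFFFF
  let h := PySem.Int.band (h * 0x85ebca6b) 0xFFFFFFFF
  let h := PySem.Int.band (PySem.Int.bxor h (h >>> (13 : Nat))) 0xFFFFFFFF
  let h := PySem.Int.band (h * 0xc2b2ae35) 0xFFFFFFFF
  PySem.Int.band (PySem.Int.bxor h (h >>> (16 : Nat))) 0xFFFFFFFF

-- ===== PORT B =====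
def pvMixK (k : Int) : Int :=
  let k := PySem.Int.band (k * 0xcc9e2d51) 0xFFFFFFFF
  let k := PySem.Int.band (PySem.Int.bor (k <<< (15 : Nat)) (k >>> (17 : Nat))) 0xFFFFFFFF
  PySem.Int.band (k * 0x1b873593) 0xFFFFFFFF

def pvMixH (h k : Int) : Int :=
  let h := PySem.Int.bxor h k
  let h := PySem.Int.band (PySem.Int.bor (h <<< (13 : Nat)) (h >>> (19 : Nat))) 0xFFFFFFFF
  PySem.Int.band (h * 5 + 0xe6546b64) 0xFFFFFFFF

def pvFmix (h length : Int) : Int :=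
  let h := PySem.Int.bxor h length
  let h := PySem.Int.band (PySem.Int.bxor h (h >>> (16 : Nat))) 0xFFFFFFFF
  let h := PySem.Int.band (h * 0x85ebca6b) 0xFFFFFFFF
  let h := PySem.Int.band (PySem.Int.bxor h (h >>> (13 : Nat))) 0xFFFFFFFF
  let h := PySem.Int.band (h * 0xc2b2ae35) 0xFFFFFFFF
  PySem.Int.band (PySem.Int.bxor h (h >>> (16 : Nat))) 0xFFFFFFFF

def pvStep (s : Int × List Int) (byte : Int) : Int × List Int :=
  let buf := s.2 ++ [byte]
  if buf.length = 4 then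
    (pvMixH s.1 (pvMixK (PySem.Int.bor (PySem.Int.bor (PySem.Int.bor
        (PySem.List.pyGetD buf 0 0)
        ((PySem.List.pyGetD buf 1 0) <<< (8 : Nat)))
        ((PySem.List.pyGetD buf 2 0) <<< (16 : Nat)))
        ((PySem.List.pyGetD buf 3 0) <<< (24 : Nat)))), [])
  else (s.1, buf)

def hash_MurmurHash3_32_alt (cadena : String) (seed : Int) : Int :=
  let data : List Int := cadena.toList.map (fun c => (c.toNat : Int))
  let s := data.foldl pvStep (seed, [])
  let h := s.1
  let buf := s.2
  let h := if buf ≠ [] then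
      let k := PySem.List.pyGetD buf 0 0
      let k := if buf.length ≥ 2 then PySem.Int.bor k ((PySem.List.pyGetD buf 1 0) <<< (8 : Nat)) else k
      let k := if buf.length = 3 then PySem.Int.bor k ((PySem.List.pyGetD buf 2 0) <<< (16 : Nat)) else k
      PySem.Int.bxor h (pvMixK k)
    else h
  pvFmix h (data.length : Int)

-- ===== PRECONDITION & SPEC =====
def Spec_hash_MurmurHash3_32 (cadena : String) (seed : Int) (out : Int) : Prop := out = hash_MurmurHash3_32_alt cadena seed
instance (cadena : String) (seed : Int) (out : Int) : Decidable (Spec_hash_MurmurHash3_32 cadena seed out) := by unfold Spec_hash_MurmurHash3_32; infer_instance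

-- ===== CLAIM (what is proved, stated in full; the proofs are below) =====
def Claim_equal_hash_MurmurHash3_32 : Prop := ∀ (cadena : String) (seed : Int), Dom_hash_MurmurHash3_32 cadena seed → Spec_hash_MurmurHash3_32 cadena seed (hash_MurmurHash3_32 cadena seed)

-- ===== LEMMAS AND PROOFS =====

-- proof-side helpers: characterizations of the two loops

def pvAsmB (a b c d : Int) : Int :=
  PySem.Int.bor (PySem.Int.bor (PySem.Int.bor a (b <<< (8 : Nat))) (c <<< (16 : Nat))) (d <<< (24 : Nat))

def pvBlockRec : List Int → Int → Int
  | a :: b :: c :: d :: t, h => pvBlockRec t (pvMixH h (pvMixK (pvAsmB a b c d)))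
  | _, h => h

def pvTailMix (h : Int) (buf : List Int) : Int :=
  if buf ≠ [] then
    let k := PySem.List.pyGetD buf 0 0
    let k := if buf.length ≥ 2 then PySem.Int.bor k ((PySem.List.pyGetD buf 1 0) <<< (8 : Nat)) else k
    let k := if buf.length = 3 then PySem.Int.bor k ((PySem.List.pyGetD buf 2 0) <<< (16 : Nat)) else k
    PySem.Int.bxor h (pvMixK k)
  else h

def pvSmall (data : List Int) : Prop := ∀ x ∈ data, 0 ≤ x ∧ x < 256

-- bit-level facts about assembling little-endian words
lemma pvBit8 (m i : Nat) (h : m < 256) (hi : 8 ≤ i) : m.testBit i = false :=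
  Nat.testBit_lt_two_pow (lt_of_lt_of_le h (by
    calc (256 : Nat) = 2 ^ 8 := by norm_num
    _ ≤ 2 ^ i := Nat.pow_le_pow_right (by norm_num) hi))

lemma pvNat2 (m0 m1 : Nat) (h0 : m0 < 256) :
    (m1 <<< (8 : Nat)) ^^^ m0 = m0 ||| (m1 <<< (8 : Nat)) := by
  apply Nat.eq_of_testBit_eq
  intro i
  simp only [Nat.testBit_xor, Nat.testBit_or, Nat.testBit_shiftLeft]
  by_cases hi : 8 ≤ i
  · simp [pvBit8 m0 i h0 hi, hi]
  · simp [hi]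

lemma pvNat3 (m0 m1 m2 : Nat) (h0 : m0 < 256) (h1 : m1 < 256) :
    ((m2 <<< (16 : Nat)) ^^^ (m1 <<< (8 : Nat))) ^^^ m0 = (m0 ||| (m1 <<< (8 : Nat))) ||| (m2 <<< (16 : Nat)) := by
  apply Nat.eq_of_testBit_eq
  intro i
  simp only [Nat.testBit_xor, Nat.testBit_or, Nat.testBit_shiftLeft]
  by_cases h8 : 8 ≤ i
  · by_cases h16 : 16 ≤ i
    · simp [pvBit8 m0 i h0 h8, pvBit8 m1 (i - 8) h1 (by omega), h8, h16]
    · simp [pvBit8 m0 i h0 h8, h8, h16]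
  · simp [h8, show ¬ 16 ≤ i by omega]

lemma pvBandFF (x : Int) (h0 : 0 ≤ x) (h1 : x < 256) : PySem.Int.band x 255 = x := by
  lift x to Nat using h0 with m
  have h255 : (255 : Int) = ((255 : Nat) : Int) := by norm_num
  rw [h255, PySem.Int.band_natCast]
  have hm : m < 256 := by exact_mod_cast h1
  have : (255 : Nat) = 2 ^ 8 - 1 := by norm_num
  rw [this, Nat.and_two_pow_sub_one_eq_mod]
  congr 1
  omega

lemma pvTake4 {l : List Int} {n : Nat} (h : 4 * n + 4 ≤ l.length) :
    l.take (4 * (n + 1)) = l.take (4 * n) ++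
      [l.getD (4 * n) 0, l.getD (4 * n + 1) 0, l.getD (4 * n + 2) 0, l.getD (4 * n + 3) 0] := by
  have e : ∀ j : Nat, j < 4 → (l.drop (4 * n)).getD j 0 = l.getD (4 * n + j) 0 := by
    intro j hj
    rw [List.getD_eq_getElem _ 0 (by rw [List.length_drop]; omega), List.getElem_drop,
        List.getD_eq_getElem l 0 (by omega)]
  obtain ⟨a, b, c, d, t, hd⟩ : ∃ a b c d t, l.drop (4 * n) = a :: b :: c :: d :: t := by
    have hlen : 4 ≤ (l.drop (4 * n)).length := by rw [List.length_drop]; omega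
    set y := l.drop (4 * n) with hy
    clear_value y
    rcases y with _ | ⟨a, y⟩
    · exfalso; simp only [List.length_nil] at hlen; omega
    rcases y with _ | ⟨b, y⟩
    · exfalso; simp only [List.length_cons, List.length_nil] at hlen; omega
    rcases y with _ | ⟨c, y⟩
    · exfalso; simp only [List.length_cons, List.length_nil] at hlen; omega
    rcases y with _ | ⟨d, y⟩
    · exfalso; simp only [List.length_cons, List.length_nil] at hlen; omega
    exact ⟨_, _, _, _, _, rfl⟩
  have ha := e 0 (by omega); have hb := e 1 (by omega)
  have hc := e 2 (by omega); have hd4 := e 3 (by omega)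
  rw [hd] at ha hb hc hd4
  simp only [List.getD_cons_zero, List.getD_cons_succ, Nat.add_zero] at ha hb hc hd4
  rw [show 4 * (n + 1) = 4 * n + 4 from by omega, List.take_add, hd]
  simp only [List.take_succ_cons, List.take_zero]
  rw [← ha, ← hb, ← hc, ← hd4]

lemma pvBlockRec_append : ∀ (n : Nat) (xs : List Int) (a b c d h : Int), xs.length = 4 * n →
    pvBlockRec (xs ++ [a, b, c, d]) h = pvMixH (pvBlockRec xs h) (pvMixK (pvAsmB a b c d)) := by
  intro n
  induction n with
  | zero =>
    intro xs a b c d h hl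
    have : xs = [] := List.eq_nil_of_length_eq_zero (by omega)
    subst this
    rfl
  | succ n ih =>
    intro xs a b c d h hl
    obtain ⟨a', b', c', d', t, rfl⟩ : ∃ a' b' c' d' t, xs = a' :: b' :: c' :: d' :: t := by
      rcases xs with _ | ⟨a', xs⟩
      · simp at hl
      rcases xs with _ | ⟨b', xs⟩
      · simp at hl; omega
      rcases xs with _ | ⟨c', xs⟩
      · simp at hl; omega
      rcases xs with _ | ⟨d', xs⟩
      · simp at hl; omega
      exact ⟨_, _, _, _, _, rfl⟩
    have ht : t.length = 4 * n := by simp at hl; omega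
    simp only [List.cons_append, pvBlockRec]
    exact ih t a b c d _ ht

-- one iteration of A's block loop reads the four bytes of block m
lemma pvLoopBody (data : List Int) (hS : pvSmall data) (m : Nat) (hm : 4 * m + 4 ≤ data.length)
    (acc : Int) :
    hash_MurmurHash3_32_loop data acc (m : Int) =
      pvMixH acc (pvMixK (pvAsmB (data.getD (4 * m) 0) (data.getD (4 * m + 1) 0)
        (data.getD (4 * m + 2) 0) (data.getD (4 * m + 3) 0))) := by
  have hmem : ∀ i : Nat, i < data.length → data.getD i 0 ∈ data := by
    intro i hi
    rw [List.getD_eq_getElem data 0 hi]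
    exact List.getElem_mem hi
  have hb : ∀ i : Nat, i < data.length → PySem.Int.band (data.getD i 0) 255 = data.getD i 0 := by
    intro i hi
    exact pvBandFF _ ((hS _ (hmem i hi)).1) ((hS _ (hmem i hi)).2)
  unfold hash_MurmurHash3_32_loop pvMixH pvMixK pvAsmB
  have e0 : ((m : Int) * 4 : Int) = ((4 * m : Nat) : Int) := by push_cast; ring
  have e1 : (((4 * m : Nat) : Int) + 1 : Int) = ((4 * m + 1 : Nat) : Int) := by push_cast; ring
  have e2 : (((4 * m : Nat) : Int) + 2 : Int) = ((4 * m + 2 : Nat) : Int) := by push_cast; ring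
  have e3 : (((4 * m : Nat) : Int) + 3 : Int) = ((4 * m + 3 : Nat) : Int) := by push_cast; ring
  simp only [e0, e1, e2, e3, PySem.List.pyGetD_natCast]
  simp only [hb (4 * m) (by omega), hb (4 * m + 1) (by omega), hb (4 * m + 2) (by omega),
    hb (4 * m + 3) (by omega)]

-- A's indexed block loop is the block recursion on the 4-byte-aligned prefix
lemma pvAfold (data : List Int) (hS : pvSmall data) (seed : Int) :
    ∀ n : Nat, 4 * n ≤ data.length →
      (PySem.List.pyRange 0 (n : Int) 1).foldl (hash_MurmurHash3_32_loop data) seed =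
        pvBlockRec (data.take (4 * n)) seed := by
  intro n
  induction n with
  | zero =>
    intro _
    rw [Nat.cast_zero, PySem.List.pyRange_one_eq_nil (le_refl 0)]
    rfl
  | succ n ih =>
    intro hn
    have hcast : ((n + 1 : Nat) : Int) = (n : Int) + 1 := by push_cast; ring
    rw [hcast, PySem.List.pyRange_one_succ_right (by positivity), List.foldl_append]
    simp only [List.foldl_cons, List.foldl_nil]
    rw [ih (by omega), pvLoopBody data hS n (by omega)]
    rw [pvTake4 (by omega)]
    rw [pvBlockRec_append n _ _ _ _ _ _ (by rw [List.length_take]; omega)]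

-- B's fold on a multiple-of-4 prefix performs exactly the block recursion
lemma pvFoldFull : ∀ (n : Nat) (xs : List Int) (h : Int), xs.length = 4 * n →
    xs.foldl pvStep (h, []) = (pvBlockRec xs h, []) := by
  intro n
  induction n with
  | zero =>
    intro xs h hl
    have : xs = [] := List.eq_nil_of_length_eq_zero (by omega)
    subst this; rfl
  | succ n ih =>
    intro xs h hl
    obtain ⟨a, b, c, d, t, rfl⟩ : ∃ a b c d t, xs = a :: b :: c :: d :: t := by
      rcases xs with _ | ⟨a, xs⟩
      · simp at hl
      rcases xs with _ | ⟨b, xs⟩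
      · simp at hl; omega
      rcases xs with _ | ⟨c, xs⟩
      · simp at hl; omega
      rcases xs with _ | ⟨d, xs⟩
      · simp at hl; omega
      exact ⟨_, _, _, _, _, rfl⟩
    have ht : t.length = 4 * n := by simp at hl; omega
    show List.foldl pvStep (pvStep (pvStep (pvStep (pvStep (h, []) a) b) c) d) t = _
    have hstep : pvStep (pvStep (pvStep (pvStep (h, []) a) b) c) d
        = (pvMixH h (pvMixK (pvAsmB a b c d)), []) := by
      simp only [pvStep, pvAsmB, List.nil_append, List.length_cons,
        List.length_nil]
      norm_num
      simp [PySem.List.pyGetD_ofNat']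
    rw [hstep, ih t _ ht]
    rfl

-- B's fold on fewer than 4 leftover bytes only fills the buffer
lemma pvFoldTail : ∀ (ys : List Int) (h : Int), ys.length < 4 →
    ys.foldl pvStep (h, []) = (h, ys) := by
  intro ys h hl
  rcases ys with _ | ⟨a, _ | ⟨b, _ | ⟨c, _ | ⟨d, t⟩⟩⟩⟩
  · rfl
  · simp [List.foldl, pvStep]
  · simp [List.foldl, pvStep]
  · simp [List.foldl, pvStep]
  · simp at hl; omega

-- B characterization
lemma pvB_char (cadena : String) (seed : Int) :
    hash_MurmurHash3_32_alt cadena seed =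
      (let data : List Int := cadena.toList.map (fun c => (c.toNat : Int))
       let q := data.length / 4
       pvFmix (pvTailMix (pvBlockRec (data.take (4 * q)) seed) (data.drop (4 * q))) (data.length : Int)) := by
  unfold hash_MurmurHash3_32_alt
  simp only []
  set data : List Int := cadena.toList.map (fun c => (c.toNat : Int)) with hdata
  have h1 : data.foldl pvStep (seed, [])
      = (pvBlockRec (data.take (4 * (data.length / 4))) seed, data.drop (4 * (data.length / 4))) := by
    conv_lhs => rw [← List.take_append_drop (4 * (data.length / 4)) data]
    rw [List.foldl_append]
    rw [pvFoldFull (data.length / 4) _ seed (by rw [List.length_take]; omega)]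
    exact pvFoldTail _ _ (by rw [List.length_drop]; omega)
  rw [h1]
  rfl

-- getD through drop
lemma pvGetDrop (l : List Int) (i j : Nat) (h : i + j < l.length) :
    (l.drop i).getD j 0 = l.getD (i + j) 0 := by
  rw [List.getD_eq_getElem _ 0 (by rw [List.length_drop]; omega), List.getElem_drop,
      List.getD_eq_getElem l 0 (by omega)]

-- A characterization
lemma pvA_char (cadena : String) (seed : Int)
    (hS : pvSmall (cadena.toList.map (fun c => (c.toNat : Int)))) :
    hash_MurmurHash3_32 cadena seed =
      (let data : List Int := cadena.toList.map (fun c => (c.toNat : Int))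
       let q := data.length / 4
       pvFmix (pvTailMix (pvBlockRec (data.take (4 * q)) seed) (data.drop (4 * q))) (data.length : Int)) := by
  unfold hash_MurmurHash3_32
  simp only []
  set data : List Int := cadena.toList.map (fun c => (c.toNat : Int)) with hdata
  have hq : PySem.Int.floordiv ((data.length : Int)) 4 = ((data.length / 4 : Nat) : Int) := by
    exact_mod_cast PySem.Int.floordiv_natCast data.length 4
  rw [hq, pvAfold data hS seed (data.length / 4) (by omega)]
  have hts : PySem.Int.band ((data.length : Int)) 3 = ((data.length % 4 : Nat) : Int) := by
    have h3 : (3 : Int) = ((3 : Nat) : Int) := by norm_num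
    rw [h3, PySem.Int.band_natCast]
    congr 1
    rw [show (3 : Nat) = 2 ^ 2 - 1 from by norm_num, Nat.and_two_pow_sub_one_eq_mod]
  rw [hts]
  have hcases : data.length % 4 = 0 ∨ data.length % 4 = 1 ∨ data.length % 4 = 2 ∨
      data.length % 4 = 3 := by omega
  have hzx : ∀ x : Int, PySem.Int.bxor 0 x = x := fun x => by
    rw [PySem.Int.bxor_comm, PySem.Int.bxor_zero]
  have e0 : ((data.length / 4 : Nat) : Int) * 4 = ((4 * (data.length / 4) : Nat) : Int) := by
    push_cast; ring
  have e1 : (((4 * (data.length / 4) : Nat) : Int) + 1) = ((4 * (data.length / 4) + 1 : Nat) : Int) := by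
    push_cast; ring
  have e2 : (((4 * (data.length / 4) : Nat) : Int) + 2) = ((4 * (data.length / 4) + 2 : Nat) : Int) := by
    push_cast; ring
  have hmem : ∀ i : Nat, i < data.length → data.getD i 0 ∈ data := by
    intro i hi
    rw [List.getD_eq_getElem data 0 hi]
    exact List.getElem_mem hi
  rcases hcases with h | h | h | h <;> rw [h]
  · -- no tail bytes
    have h44 : 4 * (data.length / 4) = data.length := by omega
    rw [h44, List.drop_length]
    norm_num
    simp [pvTailMix, pvFmix]
  · -- one tail byte
    rw [if_neg (by norm_num : ¬ ((1 : Nat) : Int) = 3),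
        if_neg (by norm_num : ¬ ((1 : Nat) : Int) ≥ 2),
        if_pos (by norm_num : ((1 : Nat) : Int) ≥ 1)]
    rw [e0, PySem.List.pyGetD_natCast]
    have hm := hmem (4 * (data.length / 4)) (by omega)
    rw [pvBandFF _ (hS _ hm).1 (hS _ hm).2]
    simp only [hzx]
    simp only [pvTailMix]
    rw [if_pos (List.ne_nil_of_length_pos (by rw [List.length_drop]; omega))]
    have hdl : (data.drop (4 * (data.length / 4))).length = 1 := by rw [List.length_drop]; omega
    rw [hdl, if_neg (by norm_num : ¬ (1 : Nat) ≥ 2), if_neg (by norm_num : ¬ (1 : Nat) = 3)]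
    rw [PySem.List.pyGetD_zero, pvGetDrop data _ 0 (by omega)]
    simp only [Nat.add_zero]
    simp only [pvMixK, pvFmix]
  · -- two tail bytes
    rw [if_neg (by norm_num : ¬ ((2 : Nat) : Int) = 3),
        if_pos (by norm_num : ((2 : Nat) : Int) ≥ 2),
        if_pos (by norm_num : ((2 : Nat) : Int) ≥ 1)]
    rw [e0, e1]
    simp only [PySem.List.pyGetD_natCast]
    have hm0 := hmem (4 * (data.length / 4)) (by omega)
    have hm1 := hmem (4 * (data.length / 4) + 1) (by omega)
    rw [pvBandFF _ (hS _ hm0).1 (hS _ hm0).2, pvBandFF _ (hS _ hm1).1 (hS _ hm1).2]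
    simp only [hzx]
    simp only [pvTailMix]
    rw [if_pos (List.ne_nil_of_length_pos (by rw [List.length_drop]; omega))]
    have hdl : (data.drop (4 * (data.length / 4))).length = 2 := by rw [List.length_drop]; omega
    rw [hdl, if_pos (by norm_num : (2 : Nat) ≥ 2), if_neg (by norm_num : ¬ (2 : Nat) = 3)]
    rw [PySem.List.pyGetD_zero, PySem.List.pyGetD_ofNat']
    rw [pvGetDrop data _ 0 (by omega), pvGetDrop data _ 1 (by omega)]
    simp only [Nat.add_zero]
    have hc0 : data.getD (4 * (data.length / 4)) 0
        = (((data.getD (4 * (data.length / 4)) 0).toNat : Nat) : Int) :=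
      (Int.toNat_of_nonneg (hS _ hm0).1).symm
    have hc1 : data.getD (4 * (data.length / 4) + 1) 0
        = (((data.getD (4 * (data.length / 4) + 1) 0).toNat : Nat) : Int) :=
      (Int.toNat_of_nonneg (hS _ hm1).1).symm
    rw [hc0, hc1]
    have key : PySem.Int.bxor (((data.getD (4 * (data.length / 4) + 1) 0).toNat : Int) <<< (8 : Nat))
          ((data.getD (4 * (data.length / 4)) 0).toNat : Int)
        = PySem.Int.bor ((data.getD (4 * (data.length / 4)) 0).toNat : Int)
          (((data.getD (4 * (data.length / 4) + 1) 0).toNat : Int) <<< (8 : Nat)) := by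
      rw [← Int.natCast_shiftLeft, PySem.Int.bxor_natCast, PySem.Int.bor_natCast,
          pvNat2 _ _ (by have := (hS _ hm0).2; omega)]
    rw [key]
    simp only [pvMixK, pvFmix]
  · -- three tail bytes
    rw [if_pos (by norm_num : ((3 : Nat) : Int) = 3),
        if_pos (by norm_num : ((3 : Nat) : Int) ≥ 2),
        if_pos (by norm_num : ((3 : Nat) : Int) ≥ 1)]
    rw [e0, e1, e2]
    simp only [PySem.List.pyGetD_natCast]
    have hm0 := hmem (4 * (data.length / 4)) (by omega)
    have hm1 := hmem (4 * (data.length / 4) + 1) (by omega)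
    have hm2 := hmem (4 * (data.length / 4) + 2) (by omega)
    rw [pvBandFF _ (hS _ hm0).1 (hS _ hm0).2, pvBandFF _ (hS _ hm1).1 (hS _ hm1).2,
        pvBandFF _ (hS _ hm2).1 (hS _ hm2).2]
    simp only [hzx]
    simp only [pvTailMix]
    rw [if_pos (List.ne_nil_of_length_pos (by rw [List.length_drop]; omega))]
    have hdl : (data.drop (4 * (data.length / 4))).length = 3 := by rw [List.length_drop]; omega
    rw [hdl, if_pos (by norm_num : (3 : Nat) ≥ 2), if_pos (rfl : (3 : Nat) = 3)]
    rw [PySem.List.pyGetD_zero, PySem.List.pyGetD_ofNat', PySem.List.pyGetD_ofNat']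
    rw [pvGetDrop data _ 0 (by omega), pvGetDrop data _ 1 (by omega), pvGetDrop data _ 2 (by omega)]
    simp only [Nat.add_zero]
    have hc0 : data.getD (4 * (data.length / 4)) 0
        = (((data.getD (4 * (data.length / 4)) 0).toNat : Nat) : Int) :=
      (Int.toNat_of_nonneg (hS _ hm0).1).symm
    have hc1 : data.getD (4 * (data.length / 4) + 1) 0
        = (((data.getD (4 * (data.length / 4) + 1) 0).toNat : Nat) : Int) :=
      (Int.toNat_of_nonneg (hS _ hm1).1).symm
    have hc2 : data.getD (4 * (data.length / 4) + 2) 0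
        = (((data.getD (4 * (data.length / 4) + 2) 0).toNat : Nat) : Int) :=
      (Int.toNat_of_nonneg (hS _ hm2).1).symm
    rw [hc0, hc1, hc2]
    have key : PySem.Int.bxor (PySem.Int.bxor
          (((data.getD (4 * (data.length / 4) + 2) 0).toNat : Int) <<< (16 : Nat))
          (((data.getD (4 * (data.length / 4) + 1) 0).toNat : Int) <<< (8 : Nat)))
          ((data.getD (4 * (data.length / 4)) 0).toNat : Int)
        = PySem.Int.bor (PySem.Int.bor ((data.getD (4 * (data.length / 4)) 0).toNat : Int)
            (((data.getD (4 * (data.length / 4) + 1) 0).toNat : Int) <<< (8 : Nat)))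
          (((data.getD (4 * (data.length / 4) + 2) 0).toNat : Int) <<< (16 : Nat)) := by
      rw [← Int.natCast_shiftLeft, ← Int.natCast_shiftLeft, PySem.Int.bxor_natCast,
          PySem.Int.bxor_natCast, PySem.Int.bor_natCast, PySem.Int.bor_natCast,
          pvNat3 _ _ _ (by have := (hS _ hm0).2; omega) (by have := (hS _ hm1).2; omega)]
    rw [key]
    simp only [pvMixK, pvFmix]

-- ===== VERDICT (by name: the statement is the Claim_ definition above) =====
theorem hash_MurmurHash3_32_spec : Claim_equal_hash_MurmurHash3_32 := by
  intro cadena seed hdom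
  have hS : pvSmall (cadena.toList.map (fun c => (c.toNat : Int))) := by
    intro x hx
    rcases List.mem_map.mp hx with ⟨c, hc, rfl⟩
    unfold Dom_hash_MurmurHash3_32 at hdom
    simp only [Bool.and_eq_true] at hdom
    have h1 := hdom.1
    unfold pvDomStr at h1
    rw [List.all_eq_true] at h1
    have h2 := h1 c hc
    unfold pvDomChar at h2
    simp only [Bool.or_eq_true, Bool.and_eq_true, decide_eq_true_eq, beq_iff_eq] at h2
    refine ⟨Int.natCast_nonneg _, ?_⟩
    have : c.toNat < 256 := by omega
    exact_mod_cast this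
  unfold Spec_hash_MurmurHash3_32
  rw [pvA_char cadena seed hS, pvB_char cadena seed]
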